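-- pv_equiv track=rewrite | github.com/VeeraSaiJoshik/AllStateJarvis | solutions/math_nt/combinatorics.py | inclusion_exclusion_example
-- ===== SOURCE A (Python) =====
-- def inclusion_exclusion_example(n, primes):
--     """
--     Count integers in [1, n] NOT divisible by any prime in primes.
--     Classic inclusion-exclusion: subtract, add back, subtract, ...
--     """
--     from itertools import combinations
--     total = 0
--     for size in range(len(primes) + 1):
--         for combo in combinations(primes, size):
--             product = 1
--             for p in combo:
--                 product *= p
--             sign = (-1) ** size
--             total += sign * (n // product)
--     return total
-- ===== SOURCE B (Python) =====
-- def inclusion_exclusion_example(n, primes):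
--     """
--     Count integers in [1, n] NOT divisible by any prime in primes.
--     DFS over the prime list carrying the product and sign incrementally,
--     instead of enumerating combinations size by size and re-multiplying.
--     """
--     def go(i, prod, sign):
--         if i == len(primes):
--             return sign * (n // prod)
--         return go(i + 1, prod, sign) + go(i + 1, prod * primes[i], -sign)
--     return go(0, 1, 1)
-- ===== Notes on version B (the rewrite author's own statement) =====
-- stated objective: alternative
-- what changed: Replaces the size-by-size itertools.combinations enumeration with inner product re-multiplication by a single DFS recursion over the prime list that carries the running product and alternating sign, doing O(1) work per subset.
import Mathlib
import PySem

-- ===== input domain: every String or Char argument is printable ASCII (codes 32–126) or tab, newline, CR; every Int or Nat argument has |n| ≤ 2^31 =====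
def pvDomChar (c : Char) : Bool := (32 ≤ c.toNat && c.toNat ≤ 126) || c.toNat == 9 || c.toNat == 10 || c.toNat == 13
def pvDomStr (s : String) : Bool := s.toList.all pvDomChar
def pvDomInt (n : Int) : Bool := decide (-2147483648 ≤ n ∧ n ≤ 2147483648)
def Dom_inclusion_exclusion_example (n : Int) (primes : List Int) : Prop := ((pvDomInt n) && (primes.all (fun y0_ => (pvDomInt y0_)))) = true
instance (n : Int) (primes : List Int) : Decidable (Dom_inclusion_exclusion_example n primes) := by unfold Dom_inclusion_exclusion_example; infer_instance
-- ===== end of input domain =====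

-- B replaces the size-by-size combinations enumeration (re-multiplying each combo's
-- product from scratch) with one DFS over the prime list carrying product and sign.

-- ===== PORT A =====
-- itertools.combinations(primes, size) ported as Mathlib's List.sublistsLen size primes
-- (same multiset of size-`size` combinations; only enumeration order differs, and the
-- loop only sums over them).
def inclusion_exclusion_example (n : Int) (primes : List Int) : Int :=
  (List.range (primes.length + 1)).foldl (fun total size =>
    (List.sublistsLen size primes).foldl (fun total combo =>
      let product := combo.foldl (fun p q => p * q) 1
      let sign := (-1 : Int) ^ size
      total + sign * PySem.Int.floordiv n product) total) 0

-- ===== PORT B =====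
def ieDfs (n : Int) : List Int → Int → Int → Int
  | [], prod, sign => sign * PySem.Int.floordiv n prod
  | q :: rest, prod, sign => ieDfs n rest prod sign + ieDfs n rest (prod * q) (-sign)

def inclusion_exclusion_example_alt (n : Int) (primes : List Int) : Int :=
  ieDfs n primes 1 1

-- ===== PRECONDITION & SPEC =====
-- Pre_ excludes lists containing 0, on which Python's n // product raises ZeroDivisionError.
def Pre_inclusion_exclusion_example (n : Int) (primes : List Int) : Prop := (0 : Int) ∉ primes
instance (n : Int) (primes : List Int) : Decidable (Pre_inclusion_exclusion_example n primes) := by unfold Pre_inclusion_exclusion_example; infer_instance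
def pvWitness_inclusion_exclusion_example : Int × List Int := (10, [2, 3])

def Spec_inclusion_exclusion_example (n : Int) (primes : List Int) (out : Int) : Prop := out = inclusion_exclusion_example_alt n primes
instance (n : Int) (primes : List Int) (out : Int) : Decidable (Spec_inclusion_exclusion_example n primes out) := by unfold Spec_inclusion_exclusion_example; infer_instance

-- ===== CLAIM (what is proved, stated in full; the proofs are below) =====
def Claim_equal_inclusion_exclusion_example : Prop := ∀ (n : Int) (primes : List Int), Dom_inclusion_exclusion_example n primes → Pre_inclusion_exclusion_example n primes → Spec_inclusion_exclusion_example n primes (inclusion_exclusion_example n primes)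

-- ===== LEMMAS AND PROOFS =====

-- B's DFS computes the signed sum over all sublists (sublists' order).
theorem ieDfs_eq_sum (n : Int) : ∀ (xs : List Int) (prod sign : Int),
    ieDfs n xs prod sign =
      ((xs.sublists').map (fun c =>
        sign * ((-1 : Int) ^ c.length * PySem.Int.floordiv n (prod * c.prod)))).sum := by
  intro xs
  induction xs with
  | nil => intro prod sign; simp [ieDfs]
  | cons q rest ih =>
    intro prod sign
    simp only [ieDfs, List.sublists'_cons, List.map_append, List.sum_append, List.map_map, ih]
    congr 1
    refine congrArg List.sum (List.map_congr_left ?_)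
    intro c _
    simp only [Function.comp_apply, List.length_cons, List.prod_cons, pow_succ]
    ring_nf

-- a foldl that only accumulates additions is the sum of a map
theorem foldl_add_of {α : Type} (F : Int → α → Int) (h : α → Int)
    (hF : ∀ t x, F t x = t + h x) : ∀ (l : List α) (a : Int),
    l.foldl F a = a + (l.map h).sum := by
  intro l
  induction l with
  | nil => intro a; simp
  | cons x l ih => intro a; simp [List.foldl_cons, hF, ih, add_assoc]

-- sum of a map over a flatMap, grouped
theorem sum_map_flatMap {α β : Type} (l : List α) (g : α → List β) (f : β → Int) :
    ((l.flatMap g).map f).sum = (l.map (fun a => ((g a).map f).sum)).sum := by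
  induction l with
  | nil => rfl
  | cons a l ih => simp [List.flatMap_cons, List.map_append, List.sum_append, ih]

-- A's double loop equals the signed sum over all sublists.
theorem portA_eq_sum (n : Int) (primes : List Int) :
    inclusion_exclusion_example n primes =
      ((primes.sublists').map (fun c =>
        (-1 : Int) ^ c.length * PySem.Int.floordiv n c.prod)).sum := by
  unfold inclusion_exclusion_example
  rw [foldl_add_of _ (fun size => ((List.sublistsLen size primes).map
        (fun c => (-1 : Int) ^ size * PySem.Int.floordiv n c.prod)).sum)
      (fun t size => foldl_add_of _ _ (fun t c => by
        simp only []
        rw [← List.prod_eq_foldl]) _ t)]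
  have h1 : (List.range (primes.length + 1)).map (fun size =>
        ((List.sublistsLen size primes).map
          (fun c => (-1 : Int) ^ size * PySem.Int.floordiv n c.prod)).sum)
      = (List.range (primes.length + 1)).map (fun size =>
        ((List.sublistsLen size primes).map
          (fun c => (-1 : Int) ^ c.length * PySem.Int.floordiv n c.prod)).sum) := by
    refine List.map_congr_left ?_
    intro size _
    refine congrArg List.sum (List.map_congr_left ?_)
    intro c hc
    rw [(List.mem_sublistsLen.mp hc).2]
  rw [h1, ← sum_map_flatMap]
  rw [List.Perm.sum_eq (List.Perm.map _ (List.range_bind_sublistsLen_perm primes))]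
  simp

-- ===== VERDICT (by name: the statement is the Claim_ definition above) =====
theorem inclusion_exclusion_example_spec : Claim_equal_inclusion_exclusion_example := by
  intro n primes _ _
  unfold Spec_inclusion_exclusion_example inclusion_exclusion_example_alt
  rw [portA_eq_sum, ieDfs_eq_sum]
  simp
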